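-- pv_equiv track=rewrite | github.com/flexwang-zz/CodeTest | PAT/PAT_B/pat1003.py | accept
-- ===== SOURCE A (Python) =====
-- def accept(s):
--     ca0 = 0
--     ca1 = 0
--     ca2 = 0
--     cp = 0
--     ct = 0
--     for c in s:
--         if c != 'P' and c != 'A' and c != 'T':
--             return False
--         if c == 'P':
--             if cp > 0 or ct > 0:
--                 return False
--             else:
--                 cp += 1
--         if c == 'T':
--             if cp == 0 or ct > 0:
--                 return False
--             else:
--                 ct += 1
--         if c == 'A':
--             if cp == 0:
--                 ca0 += 1
--             elif ct == 0:
--                 ca1 += 1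
--             else:
--                 ca2 += 1
--     if cp > 0 and ct > 0 and ca1 > 0 and (ca2 - ca0) == ca0 * (ca1 - 1):
--         return True
--     return False
-- ===== SOURCE B (Python) =====
-- def accept(s):
--     # parse s as A^a 'P' A^b 'T' A^c, then check b > 0 and c == a*b
--     def skip_a(t):
--         k = 0
--         while k < len(t) and t[k] == 'A':
--             k += 1
--         return k, t[k:]
--     a, t = skip_a(s)
--     if not t.startswith('P'):
--         return False
--     b, u = skip_a(t[1:])
--     if not u.startswith('T'):
--         return False
--     c, v = skip_a(u[1:])
--     return v == '' and b > 0 and c == a * b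
-- ===== Notes on version B (the rewrite author's own statement) =====
-- stated objective: simpler
-- what changed: Replaces the five-counter character state machine with a three-phase structural parse (A-run, 'P', A-run, 'T', A-run) followed by one arithmetic check c == a*b.
import Mathlib
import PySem

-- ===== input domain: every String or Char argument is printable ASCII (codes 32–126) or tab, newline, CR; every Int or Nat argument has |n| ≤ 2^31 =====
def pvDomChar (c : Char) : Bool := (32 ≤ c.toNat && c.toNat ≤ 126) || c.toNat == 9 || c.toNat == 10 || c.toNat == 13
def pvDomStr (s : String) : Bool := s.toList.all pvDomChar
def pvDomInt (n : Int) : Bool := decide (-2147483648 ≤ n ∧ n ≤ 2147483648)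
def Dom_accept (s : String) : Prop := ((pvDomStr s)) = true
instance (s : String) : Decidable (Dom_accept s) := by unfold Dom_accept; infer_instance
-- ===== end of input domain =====

-- B replaces A's five-counter state machine by a structural parse (A-run, 'P', A-run, 'T', A-run) plus one arithmetic check; same O(n) cost, simpler.

-- ===== PORT A =====
-- literal port of A's scanning loop: counters ca0 ca1 ca2 cp ct, early returns become `false`
def acceptLoop : List Char → Int → Int → Int → Int → Int → Bool
  | [], ca0, ca1, ca2, cp, ct =>
      decide (0 < cp) && decide (0 < ct) && decide (0 < ca1) && (ca2 - ca0 == ca0 * (ca1 - 1))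
  | c :: rest, ca0, ca1, ca2, cp, ct =>
      if c ≠ 'P' ∧ c ≠ 'A' ∧ c ≠ 'T' then false
      else if c = 'P' then
        if 0 < cp ∨ 0 < ct then false else acceptLoop rest ca0 ca1 ca2 (cp + 1) ct
      else if c = 'T' then
        if cp = 0 ∨ 0 < ct then false else acceptLoop rest ca0 ca1 ca2 cp (ct + 1)
      else
        if cp = 0 then acceptLoop rest (ca0 + 1) ca1 ca2 cp ct
        else if ct = 0 then acceptLoop rest ca0 (ca1 + 1) ca2 cp ct
        else acceptLoop rest ca0 ca1 (ca2 + 1) cp ct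

def accept (s : String) : Bool := acceptLoop s.toList 0 0 0 0 0

-- ===== PORT B =====
-- B's skip_a: count the leading 'A's and return (count, remainder); the Python while
-- loop over an index k with result t[k:] is this structural recursion on the same data.
def skipA : List Char → Nat × List Char
  | [] => (0, [])
  | c :: rest => if c = 'A' then ((skipA rest).1 + 1, (skipA rest).2) else (0, c :: rest)

def accept_alt (s : String) : Bool :=
  let p1 := skipA s.toList
  match p1.2 with
  | [] => false
  | c :: t1 =>
    if c = 'P' then
      let p2 := skipA t1
      match p2.2 with
      | [] => false
      | d :: u1 =>
        if d = 'T' then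
          let p3 := skipA u1
          p3.2.isEmpty && decide (0 < p2.1) && decide (p3.1 = p1.1 * p2.1)
        else false
    else false

-- ===== PRECONDITION & SPEC =====
def Spec_accept (s : String) (out : Bool) : Prop := out = accept_alt s
instance (s : String) (out : Bool) : Decidable (Spec_accept s out) := by unfold Spec_accept; infer_instance

-- ===== CLAIM (what is proved, stated in full; the proofs are below) =====
def Claim_equal_accept : Prop := ∀ (s : String), Dom_accept s → Spec_accept s (accept s)

-- ===== LEMMAS AND PROOFS =====

theorem skipA_decomp : ∀ cs : List Char, List.replicate (skipA cs).1 'A' ++ (skipA cs).2 = cs := by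
  intro cs
  induction cs with
  | nil => simp [skipA]
  | cons c rest ih =>
    by_cases h : c = 'A'
    · subst h; simp [skipA, List.replicate_succ, ih]
    · simp [skipA, h]

theorem skipA_head : ∀ (cs : List Char) (c : Char) (t : List Char),
    (skipA cs).2 = c :: t → c ≠ 'A' := by
  intro cs
  induction cs with
  | nil => intro c t h; simp [skipA] at h
  | cons d rest ih =>
    intro c t h
    by_cases hd : d = 'A'
    · subst hd; simp [skipA] at h; exact ih c t h
    · simp [skipA, hd] at h; exact h.1 ▸ hd

theorem loop_phase0 : ∀ (k : Nat) (rest : List Char) (ca0 ca1 ca2 : Int),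
    acceptLoop (List.replicate k 'A' ++ rest) ca0 ca1 ca2 0 0
      = acceptLoop rest (ca0 + k) ca1 ca2 0 0 := by
  intro k
  induction k with
  | zero => simp
  | succ n ih =>
    intro rest ca0 ca1 ca2
    simp only [List.replicate_succ, List.cons_append, acceptLoop]
    norm_num [ih, show ('A':Char) ≠ 'P' by decide, show ('A':Char) ≠ 'T' by decide]
    ring_nf

theorem loop_phase1 : ∀ (k : Nat) (rest : List Char) (ca0 ca1 ca2 : Int),
    acceptLoop (List.replicate k 'A' ++ rest) ca0 ca1 ca2 1 0
      = acceptLoop rest ca0 (ca1 + k) ca2 1 0 := by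
  intro k
  induction k with
  | zero => simp
  | succ n ih =>
    intro rest ca0 ca1 ca2
    simp only [List.replicate_succ, List.cons_append, acceptLoop]
    norm_num [ih, show ('A':Char) ≠ 'P' by decide, show ('A':Char) ≠ 'T' by decide]
    ring_nf

theorem loop_phase2 : ∀ (k : Nat) (rest : List Char) (ca0 ca1 ca2 : Int),
    acceptLoop (List.replicate k 'A' ++ rest) ca0 ca1 ca2 1 1
      = acceptLoop rest ca0 ca1 (ca2 + k) 1 1 := by
  intro k
  induction k with
  | zero => simp
  | succ n ih =>
    intro rest ca0 ca1 ca2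
    simp only [List.replicate_succ, List.cons_append, acceptLoop]
    norm_num [ih, show ('A':Char) ≠ 'P' by decide, show ('A':Char) ≠ 'T' by decide]
    ring_nf

-- ===== VERDICT (by name: the statement is the Claim_ definition above) =====
theorem int_key : ∀ a b c0 : Int, (c0 - a = a * (b - 1)) ↔ (c0 = a * b) := by
  intro a b c0
  constructor <;> intro h <;> linear_combination h

theorem accept_spec : Claim_equal_accept := by
  intro s _
  unfold Spec_accept accept accept_alt
  generalize s.toList = cs
  have h1 := skipA_decomp cs
  rcases hp1 : skipA cs with ⟨a, t⟩
  rw [hp1] at h1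
  rw [← h1, loop_phase0]
  rcases t with _ | ⟨c, t1⟩
  · norm_num [acceptLoop]
  · have hc : c ≠ 'A' := skipA_head cs c t1 (by rw [hp1])
    by_cases hcP : c = 'P'
    · subst hcP
      simp only [acceptLoop]
      norm_num
      have h2 := skipA_decomp t1
      rcases hp2 : skipA t1 with ⟨b, u⟩
      rw [hp2] at h2
      rw [← h2, loop_phase1]
      rcases u with _ | ⟨d, u1⟩
      · norm_num [acceptLoop]
      · have hd : d ≠ 'A' := skipA_head t1 d u1 (by rw [hp2])
        by_cases hdT : d = 'T'
        · subst hdT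
          simp only [acceptLoop]
          norm_num
          have h3 := skipA_decomp u1
          rcases hp3 : skipA u1 with ⟨c0, v⟩
          rw [hp3] at h3
          rw [← h3, loop_phase2]
          rcases v with _ | ⟨e, v1⟩
          · simp only [acceptLoop]
            norm_num
            cases hq : (((c0 : Int)) - (a : Int) == (a : Int) * ((b : Int) - 1)) with
            | false =>
                have hne : c0 ≠ a * b := by
                  intro hh
                  have : ((c0 : Int)) - a = a * ((b : Int) - 1) := (int_key a b c0).2 (by exact_mod_cast hh)
                  simp [this] at hq
                simp [hne]
            | true =>
                have heq : c0 = a * b := by exact_mod_cast (int_key a b c0).1 (beq_iff_eq.mp hq)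
                simp [heq]
          · have he : e ≠ 'A' := skipA_head u1 e v1 (by rw [hp3])
            by_cases heP : e = 'P'
            · subst heP; norm_num [acceptLoop]
            · by_cases heT : e = 'T'
              · subst heT; norm_num [acceptLoop]
              · simp [acceptLoop, he, heP, heT]
        · by_cases hdP : d = 'P'
          · subst hdP; norm_num [acceptLoop, hdT]
          · simp [acceptLoop, hd, hdP, hdT]
    · by_cases hcT : c = 'T'
      · subst hcT; norm_num [acceptLoop, hcP]
      · simp [acceptLoop, hc, hcP, hcT]
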